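-- pv_equiv track=rewrite | github.com/algorhythmer/programmers-meraro | 프로그래머스/1/42840. 모의고사/모의고사.py | solution
-- ===== SOURCE A (Python) =====
-- def solution(answers):
--     m1 = [1,2,3,4,5]
--     m2 = [2,1,2,3,2,4,2,5]
--     m3 = [3,1,2,4,5]
--
--     result = [[0,0], [1,0], [2,0]]
--     for i in range(len(answers)):
--         ans = answers[i]
--         if m1[i%5] == ans:
--             result[0][1] += 1
--         if m2[i%8] == ans:
--             result[1][1] += 1
--         if m3[(i//2)%5] == ans:
--             result[2][1] += 1
--     M = max(result[0][1], result[1][1], result[2][1])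
--     answer = []
--     for i, m in result:
--         if M==m: answer.append(i+1)
--     return answer
-- ===== SOURCE B (Python) =====
-- def _score(answers, pattern):
--     # One independent pass per supervisor: consume a working copy of the
--     # pattern front-to-back, refilling it when it runs out (a manual cycle).
--     score = 0
--     cur = []
--     for a in answers:
--         if not cur:
--             cur = list(pattern)
--         if a == cur.pop(0):
--             score += 1
--     return score
--
--
-- def solution(answers):
--     s1 = _score(answers, [1, 2, 3, 4, 5])
--     s2 = _score(answers, [2, 1, 2, 3, 2, 4, 2, 5])
--     s3 = _score(answers, [3, 3, 1, 1, 2, 2, 4, 4, 5, 5])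
--     M = max(s1, s2, s3)
--     return [i + 1 for i, s in enumerate([s1, s2, s3]) if s == M]
-- ===== Notes on version B (the rewrite author's own statement) =====
-- stated objective: alternative
-- what changed: Replaces A's single interleaved loop indexing three patterns by modular arithmetic (including the i//2 trick for the third supervisor) with three independent index-free passes, each consuming a cycling queue of the (third one pre-doubled) pattern, followed by winner collection over the enumerated score list.
import Mathlib
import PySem

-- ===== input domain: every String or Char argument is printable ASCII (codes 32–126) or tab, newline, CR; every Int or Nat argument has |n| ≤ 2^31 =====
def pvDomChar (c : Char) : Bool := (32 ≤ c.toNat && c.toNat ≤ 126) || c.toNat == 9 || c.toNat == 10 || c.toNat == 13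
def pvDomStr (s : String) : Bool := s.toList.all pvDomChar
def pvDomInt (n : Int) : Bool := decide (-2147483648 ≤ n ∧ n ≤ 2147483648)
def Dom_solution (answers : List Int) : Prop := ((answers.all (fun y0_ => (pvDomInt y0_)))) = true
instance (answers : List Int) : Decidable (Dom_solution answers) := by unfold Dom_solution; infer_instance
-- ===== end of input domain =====

-- B replaces A's single interleaved modular-index loop with three independent
-- cycling-queue passes plus winner collection over the enumerated scores
-- (objective: alternative decomposition, same O(n) cost).

-- ===== PORT A =====
-- loop body of A's for-loop (state = ((0, count1), (1, count2), (2, count3)), A's [i, count] pairs).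
-- The pattern indices i%5, i%8, (i//2)%5 are always in range, so pyGetD's default is never used.
def loopBody (answers m1 m2 m3 : List Int)
    (r : (Int × Int) × (Int × Int) × (Int × Int)) (i : Int) :
    (Int × Int) × (Int × Int) × (Int × Int) :=
  let ans := PySem.List.pyGetD answers i 0
  let r0 := if PySem.List.pyGetD m1 (PySem.Int.mod i 5) 0 == ans then (r.1.1, r.1.2 + 1) else r.1
  let r1 := if PySem.List.pyGetD m2 (PySem.Int.mod i 8) 0 == ans then (r.2.1.1, r.2.1.2 + 1) else r.2.1
  let r2 := if PySem.List.pyGetD m3 (PySem.Int.mod (PySem.Int.floordiv i 2) 5) 0 == ans then (r.2.2.1, r.2.2.2 + 1) else r.2.2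
  (r0, r1, r2)

def solution (answers : List Int) : List Int :=
  let m1 : List Int := [1, 2, 3, 4, 5]
  let m2 : List Int := [2, 1, 2, 3, 2, 4, 2, 5]
  let m3 : List Int := [3, 1, 2, 4, 5]
  let result : (Int × Int) × (Int × Int) × (Int × Int) :=
    (PySem.List.pyRange 0 (PySem.List.len answers) 1).foldl
      (loopBody answers m1 m2 m3) ((0, 0), (1, 0), (2, 0))
  let M := max result.1.2 (max result.2.1.2 result.2.2.2)
  ([result.1, result.2.1, result.2.2]).foldl
    (fun answer p => if M == p.2 then answer ++ [p.1 + 1] else answer) []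

-- ===== PORT B =====
-- _score: consume a working copy `cur` of the pattern, refilling it when empty.
-- (the inner `| [] => 0` branch is unreachable: `solution_alt` only passes nonempty patterns)
def scoreGo (pattern : List Int) : List Int → List Int → Int
  | _, [] => 0
  | cur, a :: rest =>
    match (if cur.isEmpty then pattern else cur) with
    | [] => 0
    | p :: ps => (if a == p then 1 else 0) + scoreGo pattern ps rest

def solution_alt (answers : List Int) : List Int :=
  let s1 := scoreGo [1, 2, 3, 4, 5] [] answers
  let s2 := scoreGo [2, 1, 2, 3, 2, 4, 2, 5] [] answers
  let s3 := scoreGo [3, 3, 1, 1, 2, 2, 4, 4, 5, 5] [] answers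
  let M := max s1 (max s2 s3)
  ((PySem.List.enumerate ([s1, s2, s3] : List Int) 0).filter (fun p => p.2 == M)).map
    (fun p => p.1 + 1)

-- ===== PRECONDITION & SPEC =====
def Spec_solution (answers : List Int) (out : List Int) : Prop := out = solution_alt answers
instance (answers : List Int) (out : List Int) : Decidable (Spec_solution answers out) := by unfold Spec_solution; infer_instance

-- ===== CLAIM (what is proved, stated in full; the proofs are below) =====
def Claim_equal_solution : Prop := ∀ (answers : List Int), Dom_solution answers → Spec_solution answers (solution answers)

-- ===== LEMMAS AND PROOFS =====

-- common spec: score of a pattern from position k (modular indexing)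
def cnt (pat : List Int) : Nat → List Int → Int
  | _, [] => 0
  | k, a :: rest => (if pat.getD (k % pat.length) 0 == a then 1 else 0) + cnt pat (k + 1) rest

theorem scoreGo_nil_eq (pat : List Int) (hp : pat ≠ []) (xs : List Int) :
    scoreGo pat [] xs = scoreGo pat pat xs := by
  cases xs with
  | nil => rfl
  | cons a rest =>
    have : pat.isEmpty = false := by simpa [List.isEmpty_iff] using hp
    simp [scoreGo, this]

theorem scoreGo_eq_cnt (pat : List Int) (hp : pat ≠ []) :
    ∀ (xs : List Int) (k : Nat),
      scoreGo pat (pat.drop (k % pat.length)) xs = cnt pat k xs := by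
  intro xs
  induction xs with
  | nil => intro k; rfl
  | cons a rest ih =>
    intro k
    have hL : 0 < pat.length := List.length_pos_of_ne_nil hp
    have hk : k % pat.length < pat.length := Nat.mod_lt _ hL
    have hdrop : pat.drop (k % pat.length) =
        pat[k % pat.length] :: pat.drop (k % pat.length + 1) := by
      rw [List.drop_eq_getElem_cons hk]
    have hget : pat.getD (k % pat.length) 0 = pat[k % pat.length] := List.getD_eq_getElem _ _ hk
    rw [hdrop]
    have hdm := Nat.div_add_mod k pat.length
    have hget2 : pat[k % pat.length]?.getD 0 = pat[k % pat.length] := by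
      rw [List.getElem?_eq_getElem hk]; rfl
    by_cases hsucc : k % pat.length + 1 < pat.length
    · have h1 : (k + 1) % pat.length = k % pat.length + 1 := by
        have hstep : k + 1 = (k % pat.length + 1) + pat.length * (k / pat.length) := by omega
        rw [hstep, Nat.add_mul_mod_self_left, Nat.mod_eq_of_lt hsucc]
      have hd1 : pat.drop (k % pat.length + 1) = pat.drop ((k + 1) % pat.length) := by rw [h1]
      simp only [scoreGo, List.isEmpty_cons, Bool.false_eq_true, if_false]
      rw [hd1, ih (k + 1)]
      simp only [cnt]
      rw [hget]
      by_cases hax : a = pat[k % pat.length]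
      · simp [hax]
      · have hax' : ¬ pat[k % pat.length] = a := fun h => hax h.symm
        simp [hax, hax']
    · have hL1 : k % pat.length + 1 = pat.length := by omega
      have hmul : pat.length * (k / pat.length + 1) = pat.length * (k / pat.length) + pat.length := by ring
      have heq : k + 1 = pat.length * (k / pat.length + 1) := by omega
      have h0 : (k + 1) % pat.length = 0 := by
        rw [heq, Nat.mul_mod_right]
      have hd0 : pat.drop (k % pat.length + 1) = ([] : List Int) := by
        rw [hL1]; simp
      simp only [scoreGo, List.isEmpty_cons, Bool.false_eq_true, if_false]
      rw [hd0, scoreGo_nil_eq pat hp rest]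
      have htail := ih (k + 1)
      rw [h0] at htail
      simp only [List.drop_zero] at htail
      rw [htail]
      simp only [cnt]
      rw [hget]
      by_cases hax : a = pat[k % pat.length]
      · simp [hax]
      · have hax' : ¬ pat[k % pat.length] = a := fun h => hax h.symm
        simp [hax, hax']

-- A's third pattern indexed by (k/2)%5 equals the doubled pattern indexed by k%10
theorem m3_idx (k : Nat) :
    ([3, 1, 2, 4, 5] : List Int).getD (k / 2 % 5) 0 =
      ([3, 3, 1, 1, 2, 2, 4, 4, 5, 5] : List Int).getD (k % 10) 0 := by
  have h2 : k / 2 % 5 = k % 10 / 2 := by omega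
  have hr : k % 10 < 10 := Nat.mod_lt _ (by norm_num)
  rw [h2]
  revert hr
  generalize k % 10 = r
  intro hr
  interval_cases r <;> rfl

theorem pyGetD_int_mod5 (k : Nat) :
    PySem.List.pyGetD ([1, 2, 3, 4, 5] : List Int) ((k : Int) % 5) 0 =
      ([1, 2, 3, 4, 5] : List Int).getD (k % 5) 0 := by
  have h : ((k : Int) % 5) = ((k % 5 : Nat) : Int) := by push_cast; ring
  rw [h, PySem.List.pyGetD_natCast]

theorem pyGetD_int_mod8 (k : Nat) :
    PySem.List.pyGetD ([2, 1, 2, 3, 2, 4, 2, 5] : List Int) ((k : Int) % 8) 0 =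
      ([2, 1, 2, 3, 2, 4, 2, 5] : List Int).getD (k % 8) 0 := by
  have h : ((k : Int) % 8) = ((k % 8 : Nat) : Int) := by push_cast; ring
  rw [h, PySem.List.pyGetD_natCast]

theorem pyGetD_int_div_mod (k : Nat) :
    PySem.List.pyGetD ([3, 1, 2, 4, 5] : List Int) ((k : Int) / 2 % 5) 0 =
      ([3, 3, 1, 1, 2, 2, 4, 4, 5, 5] : List Int).getD (k % 10) 0 := by
  have h : ((k : Int) / 2 % 5) = ((k / 2 % 5 : Nat) : Int) := by push_cast; ring
  rw [h, PySem.List.pyGetD_natCast, m3_idx k]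

-- step function of A's loop
def stepA (r : (Int × Int) × (Int × Int) × (Int × Int)) (p : Int × Int) :
    (Int × Int) × (Int × Int) × (Int × Int) :=
  let ans := p.2
  let r0 := if PySem.List.pyGetD ([1, 2, 3, 4, 5] : List Int) (PySem.Int.mod p.1 5) 0 == ans then (r.1.1, r.1.2 + 1) else r.1
  let r1 := if PySem.List.pyGetD ([2, 1, 2, 3, 2, 4, 2, 5] : List Int) (PySem.Int.mod p.1 8) 0 == ans then (r.2.1.1, r.2.1.2 + 1) else r.2.1
  let r2 := if PySem.List.pyGetD ([3, 1, 2, 4, 5] : List Int) (PySem.Int.mod (PySem.Int.floordiv p.1 2) 5) 0 == ans then (r.2.2.1, r.2.2.2 + 1) else r.2.2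
  (r0, r1, r2)

theorem foldl_stepA (xs : List Int) :
    ∀ (k : Nat) (c1 c2 c3 : Int),
      (PySem.List.enumerate xs (k : Int)).foldl stepA ((0, c1), (1, c2), (2, c3)) =
        ((0, c1 + cnt [1, 2, 3, 4, 5] k xs),
         (1, c2 + cnt [2, 1, 2, 3, 2, 4, 2, 5] k xs),
         (2, c3 + cnt [3, 3, 1, 1, 2, 2, 4, 4, 5, 5] k xs)) := by
  induction xs with
  | nil => intro k c1 c2 c3; simp [PySem.List.enumerate_nil, cnt]
  | cons a rest ih =>
    intro k c1 c2 c3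
    rw [PySem.List.enumerate_cons, List.foldl_cons]
    have hstep : stepA ((0, c1), (1, c2), (2, c3)) ((k : Int), a) =
        ((0, c1 + (if ([1,2,3,4,5] : List Int).getD (k % 5) 0 == a then 1 else 0)),
         (1, c2 + (if ([2,1,2,3,2,4,2,5] : List Int).getD (k % 8) 0 == a then 1 else 0)),
         (2, c3 + (if ([3,3,1,1,2,2,4,4,5,5] : List Int).getD (k % 10) 0 == a then 1 else 0))) := by
      simp only [stepA]
      simp [pyGetD_int_mod5 k, pyGetD_int_mod8 k, pyGetD_int_div_mod k]
      split_ifs <;> simp_all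
    rw [hstep]
    have hcast : (k : Int) + 1 = ((k + 1 : Nat) : Int) := by push_cast; ring
    rw [hcast, ih (k + 1)]
    simp only [cnt]
    norm_num [add_assoc]

theorem solution_eq_scores (answers : List Int) :
    solution answers =
      (let s1 := cnt [1, 2, 3, 4, 5] 0 answers
       let s2 := cnt [2, 1, 2, 3, 2, 4, 2, 5] 0 answers
       let s3 := cnt [3, 3, 1, 1, 2, 2, 4, 4, 5, 5] 0 answers
       let M := max s1 (max s2 s3)
       ([((0 : Int), s1), (1, s2), (2, s3)]).foldl
         (fun answer p => if M == p.2 then answer ++ [p.1 + 1] else answer) []) := by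
  have h2 : (PySem.List.enumerate answers ((0 : Nat) : Int)).foldl stepA
        (((0 : Int), (0 : Int)), ((1 : Int), (0 : Int)), ((2 : Int), (0 : Int))) =
      (PySem.List.pyRange 0 (PySem.List.len answers) 1).foldl
        (loopBody answers [1, 2, 3, 4, 5] [2, 1, 2, 3, 2, 4, 2, 5] [3, 1, 2, 4, 5])
        (((0 : Int), (0 : Int)), ((1 : Int), (0 : Int)), ((2 : Int), (0 : Int))) := by
    rw [show ((0 : Nat) : Int) = (0 : Int) from rfl,
        PySem.List.enumerate_eq_map_pyRange (d := 0), List.foldl_map]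
    rfl
  unfold solution
  dsimp only
  rw [← h2, foldl_stepA answers 0 0 0 0]
  simp

theorem alt_scoreGo_eq_cnt (pat : List Int) (hp : pat ≠ []) (answers : List Int) :
    scoreGo pat [] answers = cnt pat 0 answers := by
  rw [scoreGo_nil_eq pat hp answers]
  have := scoreGo_eq_cnt pat hp answers 0
  simpa using this

-- ===== VERDICT (by name: the statement is the Claim_ definition above) =====
theorem solution_spec : Claim_equal_solution := by
  intro answers _
  unfold Spec_solution
  rw [solution_eq_scores]
  unfold solution_alt
  rw [alt_scoreGo_eq_cnt [1, 2, 3, 4, 5] (by simp) answers,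
      alt_scoreGo_eq_cnt [2, 1, 2, 3, 2, 4, 2, 5] (by simp) answers,
      alt_scoreGo_eq_cnt [3, 3, 1, 1, 2, 2, 4, 4, 5, 5] (by simp) answers]
  dsimp only
  generalize cnt [1, 2, 3, 4, 5] 0 answers = s1
  generalize cnt [2, 1, 2, 3, 2, 4, 2, 5] 0 answers = s2
  generalize cnt [3, 3, 1, 1, 2, 2, 4, 4, 5, 5] 0 answers = s3
  have bc : ∀ x y : Int, (x == y) = (y == x) := by
    intro x y
    rcases eq_or_ne x y with h | h
    · rw [h]
    · simp [h, h.symm]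
  generalize hM : max s1 (max s2 s3) = M
  have hub1 : s1 ≤ M := hM ▸ le_max_left _ _
  have hub2 : s2 ≤ M := hM ▸ le_max_of_le_right (le_max_left _ _)
  have hub3 : s3 ≤ M := hM ▸ le_max_of_le_right (le_max_right _ _)
  have hmem : M = s1 ∨ M = s2 ∨ M = s3 := by
    rcases max_choice s1 (max s2 s3) with h | h
    · left; rw [← hM, h]
    · rcases max_choice s2 s3 with h' | h'
      · right; left; rw [← hM, h, h']
      · right; right; rw [← hM, h, h']
  clear hM
  by_cases h1 : M = s1 <;>
    by_cases h2 : M = s2 <;>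
      by_cases h3 : M = s3 <;>
        simp [PySem.List.enumerate_cons, PySem.List.enumerate_nil, bc, h1, h2, h3] <;> simp_all
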